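-- pv_equiv track=rewrite | github.com/zeko121/Automatic-Stenosis-Detection-in-Coronary-CT-Angiography | pipeline/compare_gt.py | artery_to_side
-- ===== SOURCE A (Python) =====
-- _SIDE_MAP = {
--     "LM": "Left", "LAD": "Left", "LCx": "Left", "LCX": "Left",
--     "D1": "Left", "D2": "Left", "OM": "Left", "OM1": "Left", "OM2": "Left",
--     "Left Coronary": "Left",
--     "RCA": "Right", "PDA": "Right", "PLB": "Right",
--     "Right Coronary": "Right",
-- }
--
-- _NAME_MAP = {
--     "LCX": "LCx", "lcx": "LCx", "Lcx": "LCx", "LCx": "LCx",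
--     "LM": "LM", "lm": "LM",
--     "LAD": "LAD", "lad": "LAD",
--     "RCA": "RCA", "rca": "RCA",
--     "Left Coronary": "LAD",
--     "Right Coronary": "RCA",
-- }
--
-- _REGION_PREFIXES = ["proximal", "mid", "distal"]
--
-- def normalize_artery_name(name):
--     """Normalize to one of LM, LAD, LCx, RCA. Returns None if unmappable."""
--     if not name:
--         return None
--
--     name = name.strip()
--
--     if name in _NAME_MAP:
--         return _NAME_MAP[name]
--
--     # strip regional prefixes like "proximal LAD"
--     lower = name.lower()
--     for prefix in _REGION_PREFIXES:
--         if lower.startswith(prefix + " "):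
--             remainder = name[len(prefix) + 1:].strip()
--             return normalize_artery_name(remainder)
--
--     # handle underscore-separated GT keys like "LAD_prox"
--     if "_" in name:
--         base = name.split("_")[0]
--         return normalize_artery_name(base)
--
--     return None
--
-- def artery_to_side(name, dominance=None):
--     """map artery name to 'Left' or 'Right'. returns None if unmappable.
--
--     PDA/PLB go to Right by default, but override to Left if dominance=='Left'.
--     """
--     if not name:
--         return None
--
--     name = name.strip()
--
--     # direct lookup
--     if name in _SIDE_MAP:
--         side = _SIDE_MAP[name]
--         # PDA/PLB override for left dominance
--         base = name.split("_")[0] if "_" in name else name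
--         if base in ("PDA", "PLB") and dominance == "Left":
--             return "Left"
--         return side
--
--     # strip regional prefixes
--     lower = name.lower()
--     for prefix in _REGION_PREFIXES:
--         if lower.startswith(prefix + " "):
--             remainder = name[len(prefix) + 1:].strip()
--             return artery_to_side(remainder, dominance)
--
--     # underscore-separated GT keys like "LAD_prox"
--     if "_" in name:
--         base = name.split("_")[0]
--         return artery_to_side(base, dominance)
--
--     # try via normalize_artery_name -> _SIDE_MAP
--     canonical = normalize_artery_name(name)
--     if canonical and canonical in _SIDE_MAP:
--         return _SIDE_MAP[canonical]
--
--     return None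
-- ===== SOURCE B (Python) =====
-- # B: iterative while-loop decomposition of A's self-recursion, with the
-- # normalize_artery_name fallback precomputed into a small direct lookup table.
--
-- _SIDE_MAP = {
--     "LM": "Left", "LAD": "Left", "LCx": "Left", "LCX": "Left",
--     "D1": "Left", "D2": "Left", "OM": "Left", "OM1": "Left", "OM2": "Left",
--     "Left Coronary": "Left",
--     "RCA": "Right", "PDA": "Right", "PLB": "Right",
--     "Right Coronary": "Right",
-- }
--
-- _REGION_PREFIXES = ["proximal", "mid", "distal"]
--
-- # names that only the normalize_artery_name fallback can map to a side
-- _FALLBACK_SIDE = {"lcx": "Left", "Lcx": "Left", "lm": "Left", "lad": "Left", "rca": "Right"}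
--
-- def artery_to_side(name, dominance=None):
--     while True:
--         if not name:
--             return None
--         name = name.strip()
--         if name in _SIDE_MAP:
--             if name in ("PDA", "PLB") and dominance == "Left":
--                 return "Left"
--             return _SIDE_MAP[name]
--         lower = name.lower()
--         for prefix in _REGION_PREFIXES:
--             if lower.startswith(prefix + " "):
--                 name = name[len(prefix) + 1:]
--                 break
--         else:
--             if "_" in name:
--                 name = name.split("_")[0]
--             else:
--                 return _FALLBACK_SIDE.get(name)
-- ===== Notes on version B (the rewrite author's own statement) =====
-- stated objective: simpler
-- what changed: Replaces A's self-recursion (and its recursive normalize_artery_name helper fallback) with a single while loop that re-strips and re-checks the side map each iteration, precomputing the normalize fallback into a direct five-entry lookup table.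
import Mathlib
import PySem

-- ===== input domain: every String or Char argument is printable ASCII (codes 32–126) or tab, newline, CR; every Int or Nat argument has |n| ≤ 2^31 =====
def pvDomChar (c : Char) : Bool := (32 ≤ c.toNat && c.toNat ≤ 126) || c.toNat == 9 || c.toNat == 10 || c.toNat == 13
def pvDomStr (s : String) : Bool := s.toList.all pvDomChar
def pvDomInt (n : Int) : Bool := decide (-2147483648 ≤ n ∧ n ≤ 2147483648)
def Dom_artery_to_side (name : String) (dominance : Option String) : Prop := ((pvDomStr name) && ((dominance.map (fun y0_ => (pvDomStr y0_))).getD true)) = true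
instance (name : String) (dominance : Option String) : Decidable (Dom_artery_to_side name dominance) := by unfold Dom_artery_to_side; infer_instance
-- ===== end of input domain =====

-- B replaces A's self-recursion by a single fuelled loop and precomputes the
-- normalize_artery_name fallback into a direct five-entry lookup table (objective: simpler).


-- ===== PORT A =====
def sideMap : PySem.Dict String String := PySem.Dict.ofList
  [("LM", "Left"), ("LAD", "Left"), ("LCx", "Left"), ("LCX", "Left"),
   ("D1", "Left"), ("D2", "Left"), ("OM", "Left"), ("OM1", "Left"), ("OM2", "Left"),
   ("Left Coronary", "Left"),
   ("RCA", "Right"), ("PDA", "Right"), ("PLB", "Right"),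
   ("Right Coronary", "Right")]

def nameMap : PySem.Dict String String := PySem.Dict.ofList
  [("LCX", "LCx"), ("lcx", "LCx"), ("Lcx", "LCx"), ("LCx", "LCx"),
   ("LM", "LM"), ("lm", "LM"),
   ("LAD", "LAD"), ("lad", "LAD"),
   ("RCA", "RCA"), ("rca", "RCA"),
   ("Left Coronary", "LAD"),
   ("Right Coronary", "RCA")]

def regionPrefixes : List String := ["proximal", "mid", "distal"]

-- fuelled transliteration of the self-recursive normalize_artery_name (fuel = len+1 always suffices:
-- each recursive call passes a strictly shorter string)
def normalizeGo : Nat → String → Option String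
  | 0, _ => none
  | fuel + 1, name =>
    if name = "" then none
    else
      let name := PySem.Str.strip name
      match nameMap.get? name with
      | some v => some v
      | none =>
        let lower := PySem.Str.lower name
        match regionPrefixes.find? (fun p => PySem.Str.startswith lower (p ++ " ")) with
        | some p => normalizeGo fuel (PySem.Str.strip (PySem.Str.slice name (some ((PySem.Str.len p : Int) + 1)) none))
        | none =>
          if PySem.Str.isIn "_" name then
            normalizeGo fuel (((PySem.Str.split? name "_").getD []).headD "")
          else none

def normalize_artery_name (name : String) : Option String :=
  normalizeGo (name.toList.length + 1) name

def arteryGo : Nat → String → Option String → Option String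
  | 0, _, _ => none
  | fuel + 1, name, dominance =>
    if name = "" then none
    else
      let name := PySem.Str.strip name
      match sideMap.get? name with
      | some side =>
        let base := if PySem.Str.isIn "_" name then ((PySem.Str.split? name "_").getD []).headD "" else name
        if (base = "PDA" ∨ base = "PLB") ∧ dominance = some "Left" then some "Left" else some side
      | none =>
        let lower := PySem.Str.lower name
        match regionPrefixes.find? (fun p => PySem.Str.startswith lower (p ++ " ")) with
        | some p => arteryGo fuel (PySem.Str.strip (PySem.Str.slice name (some ((PySem.Str.len p : Int) + 1)) none)) dominance
        | none =>
          if PySem.Str.isIn "_" name then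
            arteryGo fuel (((PySem.Str.split? name "_").getD []).headD "") dominance
          else
            match normalize_artery_name name with
            | some canonical =>
              if canonical ≠ "" then
                match sideMap.get? canonical with
                | some v => some v
                | none => none
              else none
            | none => none

def artery_to_side (name : String) (dominance : Option String) : Option String :=
  arteryGo (name.toList.length + 1) name dominance

-- ===== PORT B =====
-- names only the normalize_artery_name fallback can map to a side
def fallbackSide : PySem.Dict String String := PySem.Dict.ofList
  [("lcx", "Left"), ("Lcx", "Left"), ("lm", "Left"), ("lad", "Left"), ("rca", "Right")]

-- the while-True loop of Source B, one fuel tick per iteration (fuel = len+1 always suffices: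
-- every continued iteration strictly shortens the name)
def altGo : Nat → String → Option String → Option String
  | 0, _, _ => none
  | fuel + 1, name, dominance =>
    if name = "" then none
    else
      let name := PySem.Str.strip name
      match sideMap.get? name with
      | some side =>
        if (name = "PDA" ∨ name = "PLB") ∧ dominance = some "Left" then some "Left" else some side
      | none =>
        let lower := PySem.Str.lower name
        match regionPrefixes.find? (fun p => PySem.Str.startswith lower (p ++ " ")) with
        | some p => altGo fuel (PySem.Str.slice name (some ((PySem.Str.len p : Int) + 1)) none) dominance
        | none =>
          if PySem.Str.isIn "_" name then
            altGo fuel (((PySem.Str.split? name "_").getD []).headD "") dominance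
          else fallbackSide.get? name

def artery_to_side_alt (name : String) (dominance : Option String) : Option String :=
  altGo (name.toList.length + 1) name dominance

-- ===== PRECONDITION & SPEC =====
def Spec_artery_to_side (name : String) (dominance : Option String) (out : Option String) : Prop := out = artery_to_side_alt name dominance
instance (name : String) (dominance : Option String) (out : Option String) : Decidable (Spec_artery_to_side name dominance out) := by unfold Spec_artery_to_side; infer_instance

-- ===== CLAIM (what is proved, stated in full; the proofs are below) =====
def Claim_equal_artery_to_side : Prop := ∀ (name : String) (dominance : Option String), Dom_artery_to_side name dominance → Spec_artery_to_side name dominance (artery_to_side name dominance)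

-- ===== LEMMAS AND PROOFS =====

theorem dropWhile_of_prefix_dropWhile (p : Char → Bool) (l r : List Char)
    (h : r <+: List.dropWhile p l) : List.dropWhile p r = r := by
  cases r with
  | nil => simp
  | cons c cs =>
    obtain ⟨t, ht⟩ := h
    have hc : p c = false := by
      have hne : List.dropWhile p l ≠ [] := by rw [← ht]; simp
      have := List.head_dropWhile_not p hne
      rwa [show (List.dropWhile p l).head hne = c by simp [← ht]] at this
    simp [hc]

theorem lstrip_rstrip_lstrip (l : List Char) :
    PySem.Chars.lstrip (PySem.Chars.rstrip (PySem.Chars.lstrip l)) = PySem.Chars.rstrip (PySem.Chars.lstrip l) := by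
  simp only [PySem.Chars.lstrip, PySem.Chars.rstrip]
  apply dropWhile_of_prefix_dropWhile PySem.Chars.isspace l
  rw [← List.reverse_suffix, List.reverse_reverse]
  exact List.dropWhile_suffix _

theorem chars_strip_idem (l : List Char) :
    PySem.Chars.strip (PySem.Chars.strip l) = PySem.Chars.strip l := by
  simp only [PySem.Chars.strip]
  rw [lstrip_rstrip_lstrip]
  simp [PySem.Chars.rstrip, List.dropWhile_idempotent]

theorem str_strip_idem (s : String) : PySem.Str.strip (PySem.Str.strip s) = PySem.Str.strip s := by
  apply String.toList_inj.mp
  simp [chars_strip_idem]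

-- B's loop body only looks at the stripped name, so pre-stripping the argument is invisible
theorem altGo_strip (f : Nat) (t : String) (dom : Option String) :
    altGo f (PySem.Str.strip t) dom = altGo f t dom := by
  cases f with
  | zero => rfl
  | succ f =>
    by_cases ht : t = ""
    · subst ht; rfl
    · by_cases h2 : PySem.Str.strip t = ""
      · rw [h2]
        conv_rhs => unfold altGo
        rw [if_neg ht, h2]
        rfl
      · conv_lhs => unfold altGo
        conv_rhs => unfold altGo
        rw [if_neg ht, if_neg h2, str_strip_idem]

-- the direct-lookup branch: a name that is a _SIDE_MAP key contains no underscore,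
-- so A's base computation is the name itself
theorem side_case (name : String) (dom : Option String) (side : String)
    (hside : sideMap.get? (PySem.Str.strip name) = some side) :
    (let base := if PySem.Str.isIn "_" (PySem.Str.strip name) = true then ((PySem.Str.split? (PySem.Str.strip name) "_").getD []).headD "" else PySem.Str.strip name;
     if (base = "PDA" ∨ base = "PLB") ∧ dom = some "Left" then some "Left" else some side) =
    (if (PySem.Str.strip name = "PDA" ∨ PySem.Str.strip name = "PLB") ∧ dom = some "Left" then some "Left" else some side) := by
  have hc : sideMap.contains (PySem.Str.strip name) = true := by
    rw [PySem.Dict.contains_eq_isSome_get?, hside]; rfl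
  have hmem := (PySem.Dict.contains_iff_mem_keys _ _).mp hc
  have hk : sideMap.keys = ["LM","LAD","LCx","LCX","D1","D2","OM","OM1","OM2","Left Coronary","RCA","PDA","PLB","Right Coronary"] := by decide
  rw [hk] at hmem
  simp only [List.mem_cons, List.not_mem_nil, or_false] at hmem
  rcases hmem with h|h|h|h|h|h|h|h|h|h|h|h|h|h <;> rw [h] <;> rfl

-- the exhausted-stripping branch: A's normalize_artery_name fallback equals B's direct table
set_option maxHeartbeats 2000000 in
theorem fallback_case (s : String) (hstrip : PySem.Str.strip s = s)
    (hside : sideMap.get? s = none)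
    (hp : List.find? (fun p => PySem.Str.startswith (PySem.Str.lower s) (p ++ " ")) regionPrefixes = none)
    (hu : ¬ PySem.Str.isIn "_" s = true) :
    (match normalize_artery_name s with
     | some canonical => if canonical ≠ "" then (match sideMap.get? canonical with | some v => some v | none => none) else none
     | none => none) = fallbackSide.get? s := by
  by_cases hse : s = ""
  · subst hse; decide
  · rcases hnm : nameMap.get? s with _ | c
    · have hn0 : normalize_artery_name s = none := by
        unfold normalize_artery_name normalizeGo
        rw [if_neg hse]
        simp only [hstrip, hnm]
        rw [hp, if_neg hu]
      rw [hn0]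
      have hnk : s ∉ nameMap.keys := (PySem.Dict.get?_eq_none_iff_not_mem_keys _ _).mp hnm
      have hf : fallbackSide.get? s = none := by
        rw [PySem.Dict.get?_eq_none_iff_not_mem_keys]
        intro hmem
        apply hnk
        have hk1 : fallbackSide.keys = ["lcx","Lcx","lm","lad","rca"] := by decide
        have hk2 : nameMap.keys = ["LCX","lcx","Lcx","LCx","LM","lm","LAD","lad","RCA","rca","Left Coronary","Right Coronary"] := by decide
        rw [hk1] at hmem; rw [hk2]
        simp only [List.mem_cons, List.not_mem_nil, or_false] at hmem ⊢
        tauto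
      rw [hf]
    · have hc : nameMap.contains s = true := by
        rw [PySem.Dict.contains_eq_isSome_get?, hnm]; rfl
      have hmem := (PySem.Dict.contains_iff_mem_keys _ _).mp hc
      have hk2 : nameMap.keys = ["LCX","lcx","Lcx","LCx","LM","lm","LAD","lad","RCA","rca","Left Coronary","Right Coronary"] := by decide
      rw [hk2] at hmem
      simp only [List.mem_cons, List.not_mem_nil, or_false] at hmem
      rcases hmem with h|h|h|h|h|h|h|h|h|h|h|h <;>
        first
        | (rw [h] at hside; exact absurd hside (by decide))
        | (rw [h]; decide)

-- one synchronized step per unit of fuel: A's recursion and B's loop agree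
theorem go_eq (f : Nat) : ∀ (name : String) (dom : Option String), arteryGo f name dom = altGo f name dom := by
  induction f with
  | zero => intro name dom; rfl
  | succ f ih =>
    intro name dom
    by_cases hn : name = ""
    · subst hn; rfl
    · unfold arteryGo altGo
      rw [if_neg hn, if_neg hn]
      have hstrip : PySem.Str.strip (PySem.Str.strip name) = PySem.Str.strip name := str_strip_idem name
      rcases hside : sideMap.get? (PySem.Str.strip name) with _ | side
      · simp only [hside]
        rcases hp : List.find? (fun p => PySem.Str.startswith (PySem.Str.lower (PySem.Str.strip name)) (p ++ " ")) regionPrefixes with _ | p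
        · by_cases hu : PySem.Str.isIn "_" (PySem.Str.strip name) = true
          · rw [if_pos hu, if_pos hu]
            exact ih _ dom
          · rw [if_neg hu, if_neg hu]
            exact fallback_case _ hstrip hside hp hu
        · show arteryGo f (PySem.Str.strip (PySem.Str.slice (PySem.Str.strip name) (some ((PySem.Str.len p : Int) + 1)) none)) dom = altGo f (PySem.Str.slice (PySem.Str.strip name) (some ((PySem.Str.len p : Int) + 1)) none) dom
          rw [ih]
          exact altGo_strip f _ dom
      · simp only [hside]
        exact side_case name dom side hside

-- ===== VERDICT (by name: the statement is the Claim_ definition above) =====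
theorem artery_to_side_spec : Claim_equal_artery_to_side := by
  intro name dom _
  unfold Spec_artery_to_side artery_to_side artery_to_side_alt
  exact go_eq _ name dom
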